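-- pv_equiv track=rewrite | github.com/ZeromusSoftware/z01 | python/td2.py | exa
-- ===== SOURCE A (Python) =====
-- def exa(int) :
-- 	i = 0
-- 	result = ''
-- 	while int > 0 :
-- 		i += 1
-- 		x = int % 16
-- 		if x == 10 :
-- 			x = 'A'
-- 		if x == 11 :
-- 			x = 'B'
-- 		if x == 12 :
-- 			x = 'C'
-- 		if x == 13 :
-- 			x = 'D'
-- 		if x == 14 :
-- 			x = 'E'
-- 		if x == 15 :
-- 			x = 'F'
-- 		result = str(x) + ' ' + result
-- 		int = int // 16
-- 	result = result
-- 	return result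
-- ===== SOURCE B (Python) =====
-- def exa(int):
--     if int <= 0:
--         return ''
--     x = int % 16
--     d = chr(ord('A') + x - 10) if x >= 10 else str(x)
--     return exa(int // 16) + d + ' '
-- ===== Notes on version B (the rewrite author's own statement) =====
-- stated objective: simpler
-- what changed: Replaces A's while-loop that prepends each hex digit to an accumulator string (with a chain of six if-statements mapping the letter digits) by a direct recursion on the quotient that appends the least-significant digit after the recursive call, computing letter digits arithmetically with chr().
import Mathlib
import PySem

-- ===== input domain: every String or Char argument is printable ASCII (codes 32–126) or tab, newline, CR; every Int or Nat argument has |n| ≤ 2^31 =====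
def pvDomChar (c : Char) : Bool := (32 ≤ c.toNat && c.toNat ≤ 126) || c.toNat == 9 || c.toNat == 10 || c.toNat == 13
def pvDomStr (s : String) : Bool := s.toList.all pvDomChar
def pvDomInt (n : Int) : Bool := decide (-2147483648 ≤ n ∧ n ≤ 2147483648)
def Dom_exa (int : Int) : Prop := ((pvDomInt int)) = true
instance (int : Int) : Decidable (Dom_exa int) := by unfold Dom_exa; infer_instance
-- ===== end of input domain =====

-- B replaces A's accumulator while-loop (prepend digit, chain of ifs for A-F) by a direct
-- recursion on n // 16 that appends the current digit after the recursive call; objective: simpler.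


-- ===== PORT A =====
-- A's chain of six `if` statements rebinding x (after a match, later comparisons are
-- string-vs-int and thus False in Python, so else-chaining is exact); final str(x).
def exaDigitA (x : Int) : String :=
  if x = 10 then "A"
  else if x = 11 then "B"
  else if x = 12 then "C"
  else if x = 13 then "D"
  else if x = 14 then "E"
  else if x = 15 then "F"
  else PySem.Int.toStr x

theorem exa_floordiv_lt (n : Int) (h : 0 < n) :
    (PySem.Int.floordiv n 16).toNat < n.toNat := by
  rw [PySem.Int.floordiv_eq_ediv_of_pos (by omega : (0:Int) < 16)]
  omega

-- A's while loop: state (int, result); `i` is dead state and is dropped.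
def exaLoop (n : Int) (result : String) : String :=
  if h : 0 < n then
    exaLoop (PySem.Int.floordiv n 16)
      (exaDigitA (PySem.Int.mod n 16) ++ " " ++ result)
  else result
termination_by n.toNat
decreasing_by exact exa_floordiv_lt n h

def exa (int : Int) : String := exaLoop int ""

-- ===== PORT B =====
def exa_alt (int : Int) : String :=
  if h : int ≤ 0 then ""
  else
    let x := PySem.Int.mod int 16
    let d := if 10 ≤ x then String.mk [Char.ofNat (65 + x.toNat - 10)]
             else PySem.Int.toStr x
    exa_alt (PySem.Int.floordiv int 16) ++ d ++ " "
termination_by int.toNat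
decreasing_by exact exa_floordiv_lt int (by omega)

-- ===== PRECONDITION & SPEC =====
def Spec_exa (int : Int) (out : String) : Prop := out = exa_alt int
instance (int : Int) (out : String) : Decidable (Spec_exa int out) := by unfold Spec_exa; infer_instance

-- ===== CLAIM (what is proved, stated in full; the proofs are below) =====
def Claim_equal_exa : Prop := ∀ (int : Int), Dom_exa int → Spec_exa int (exa int)

-- ===== LEMMAS AND PROOFS =====

theorem exa_digit_eq (x : Int) (h0 : 0 ≤ x) (h16 : x < 16) :
    exaDigitA x =
      (if 10 ≤ x then String.mk [Char.ofNat (65 + x.toNat - 10)]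
       else PySem.Int.toStr x) := by
  interval_cases x <;> decide

theorem exa_loop_eq (k : Nat) (n : Int) (hk : n.toNat = k) (r : String) :
    exaLoop n r = exa_alt n ++ r := by
  induction k using Nat.strong_induction_on generalizing n r with
  | _ k ih =>
    rw [exaLoop, exa_alt]
    by_cases h : 0 < n
    · have hd : (PySem.Int.floordiv n 16).toNat < k := hk ▸ exa_floordiv_lt n h
      rw [dif_pos h, dif_neg (by omega : ¬ n ≤ 0),
        ih _ hd _ rfl]
      rw [exa_digit_eq (PySem.Int.mod n 16)
        (PySem.Int.mod_nonneg n (by omega)) (PySem.Int.mod_lt n (by omega))]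
      simp [String.append_assoc]
    · rw [dif_neg h, dif_pos (by omega : n ≤ 0)]
      simp

-- ===== VERDICT (by name: the statement is the Claim_ definition above) =====
theorem exa_spec : Claim_equal_exa := by
  intro n _
  unfold Spec_exa exa
  rw [exa_loop_eq n.toNat n rfl ""]
  simp
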